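-- pv_equiv track=rewrite | github.com/vaibhavselkar/AI-founding-engineer-assignment | app/services/aeo_checks/htag_hierarchy.py | _find_violations
-- ===== SOURCE A (Python) =====
-- def _find_violations(htags: list) -> list:
--     """Find all heading hierarchy violations"""
--     violations = []
--
--     if not htags:
--         violations.append("No heading tags found in content")
--         return violations
--
--     # Check exactly one H1
--     h1_count = htags.count("h1")
--     if h1_count == 0:
--         violations.append("No H1 tag found — every page must have exactly one H1")
--     elif h1_count > 1:
--         violations.append(f"Multiple H1 tags found ({h1_count}) — only one H1 allowed")
--
--     # Check no H tag appears before H1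
--     if "h1" in htags:
--         h1_index = htags.index("h1")
--         tags_before_h1 = htags[:h1_index]
--         if tags_before_h1:
--             violations.append(
--                 f"Heading tags {tags_before_h1} appear before H1"
--             )
--
--     # Check no level is skipped
--     level_map = {"h1": 1, "h2": 2, "h3": 3, "h4": 4, "h5": 5, "h6": 6}
--     prev_level = 0
--
--     for tag in htags:
--         current_level = level_map.get(tag, 0)
--         if prev_level > 0 and current_level > prev_level + 1:
--             violations.append(
--                 f"Heading level skipped: {tag} follows h{prev_level} "
--                 f"(missing h{prev_level + 1})"
--             )
--         prev_level = current_level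
--
--     return violations
-- ===== SOURCE B (Python) =====
-- def _find_violations(htags: list) -> list:
--     """Find all heading hierarchy violations (single pass)"""
--     if not htags:
--         return ["No heading tags found in content"]
--
--     level_map = {"h1": 1, "h2": 2, "h3": 3, "h4": 4, "h5": 5, "h6": 6}
--     h1_count = 0
--     before_h1 = None
--     prev_level = 0
--     skips = []
--
--     for i, tag in enumerate(htags):
--         if tag == "h1":
--             h1_count += 1
--             if before_h1 is None:
--                 before_h1 = htags[:i]
--         current_level = level_map.get(tag, 0)
--         if prev_level > 0 and current_level > prev_level + 1:
--             skips.append(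
--                 f"Heading level skipped: {tag} follows h{prev_level} "
--                 f"(missing h{prev_level + 1})"
--             )
--         prev_level = current_level
--
--     violations = []
--     if h1_count == 0:
--         violations.append("No H1 tag found — every page must have exactly one H1")
--     elif h1_count > 1:
--         violations.append(f"Multiple H1 tags found ({h1_count}) — only one H1 allowed")
--     if before_h1:
--         violations.append(f"Heading tags {before_h1} appear before H1")
--     return violations + skips
-- ===== Notes on version B (the rewrite author's own statement) =====
-- stated objective: alternative
-- what changed: Replaces A's four separate scans of the tag list (count, membership test, index+slice, level loop) by a single enumerate pass that maintains h1_count, the prefix before the first h1 and the previous level, assembling the messages in A's order afterwards.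
import Mathlib
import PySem

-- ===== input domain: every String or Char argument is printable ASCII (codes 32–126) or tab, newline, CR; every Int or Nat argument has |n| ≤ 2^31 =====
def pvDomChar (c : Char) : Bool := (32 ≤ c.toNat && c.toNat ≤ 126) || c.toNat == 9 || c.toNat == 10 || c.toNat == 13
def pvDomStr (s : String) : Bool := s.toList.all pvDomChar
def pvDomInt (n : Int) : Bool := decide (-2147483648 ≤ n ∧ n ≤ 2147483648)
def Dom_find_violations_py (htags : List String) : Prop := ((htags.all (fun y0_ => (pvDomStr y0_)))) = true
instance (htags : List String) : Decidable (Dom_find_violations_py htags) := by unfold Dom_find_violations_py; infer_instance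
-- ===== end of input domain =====

-- B is a single enumerate pass maintaining running state instead of A's four separate scans; same messages, same order.

-- shared formatting helpers (both Pythons use the identical f-strings / str(list))

-- Python repr of one character inside a string repr with chosen quote q;
-- exact for printable ASCII plus tab/newline/CR (the stated domain).
def pyCharRepr (q : Char) (c : Char) : List Char :=
  if c = '\\' then ['\\', '\\']
  else if c = q then ['\\', q]
  else if c = Char.ofNat 9 then ['\\', 't']
  else if c = Char.ofNat 10 then ['\\', 'n']
  else if c = Char.ofNat 13 then ['\\', 'r']
  else [c]

-- Python repr of a string: single quotes unless it contains ' and no "; exact on the stated domain.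
def pyStrRepr (s : String) : String :=
  let cs := s.toList
  let q := if cs.contains '\'' && !(cs.contains '"') then '"' else '\''
  String.ofList ([q] ++ cs.flatMap (pyCharRepr q) ++ [q])

-- str(list_of_strings)
def pyListRepr (l : List String) : String :=
  "[" ++ PySem.Str.join ", " (l.map pyStrRepr) ++ "]"

def msgEmpty : String := "No heading tags found in content"
def msgNoH1 : String := "No H1 tag found — every page must have exactly one H1"
def msgMulti (n : Int) : String :=
  "Multiple H1 tags found (" ++ PySem.Int.toStr n ++ ") — only one H1 allowed"
def msgBefore (l : List String) : String :=
  "Heading tags " ++ pyListRepr l ++ " appear before H1"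
def msgSkip (tag : String) (prev : Int) : String :=
  "Heading level skipped: " ++ tag ++ " follows h" ++ PySem.Int.toStr prev ++
    " (missing h" ++ PySem.Int.toStr (prev + 1) ++ ")"

def pvLevelMap : PySem.Dict String Int :=
  PySem.Dict.ofList [("h1", 1), ("h2", 2), ("h3", 3), ("h4", 4), ("h5", 5), ("h6", 6)]

-- ===== PORT A =====
def find_violations_py (htags : List String) : List String :=
  if htags = [] then [msgEmpty]
  else
    let h1_count : Int := (PySem.List.count htags "h1" : Int)
    let violations : List String :=
      if h1_count = 0 then [msgNoH1]
      else if h1_count > 1 then [msgMulti h1_count]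
      else []
    let violations :=
      if htags.contains "h1" then
        match PySem.List.index? htags "h1" with
        | some h1_index =>
            let tags_before_h1 := PySem.List.slice htags none (some (h1_index : Int))
            if tags_before_h1 ≠ [] then violations ++ [msgBefore tags_before_h1]
            else violations
        | none => violations
      else violations
    (htags.foldl
      (fun (st : List String × Int) tag =>
        let current := PySem.Dict.getD pvLevelMap tag 0
        (if st.2 > 0 ∧ current > st.2 + 1 then st.1 ++ [msgSkip tag st.2] else st.1,
         current))
      (violations, 0)).1

-- ===== PORT B =====
-- single-pass state: (h1_count, before_h1 : Option prefix, prev_level, skip buffer)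
def pvStepB (htags : List String)
    (st : Int × Option (List String) × Int × List String) (p : Int × String) :
    Int × Option (List String) × Int × List String :=
  let (c, b, prev, sk) := st
  let tag := p.2
  let c := if tag = "h1" then c + 1 else c
  let b := if tag = "h1" ∧ b = none then some (PySem.List.slice htags none (some p.1)) else b
  let cur := PySem.Dict.getD pvLevelMap tag 0
  let sk := if prev > 0 ∧ cur > prev + 1 then sk ++ [msgSkip tag prev] else sk
  (c, b, cur, sk)

def find_violations_py_alt (htags : List String) : List String :=
  if htags = [] then [msgEmpty]
  else
    let st := (PySem.List.enumerate htags 0).foldl (pvStepB htags) (0, none, 0, [])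
    let c := st.1
    let b := st.2.1
    let sk := st.2.2.2
    let violations : List String :=
      if c = 0 then [msgNoH1]
      else if c > 1 then [msgMulti c]
      else []
    let violations :=
      match b with
      | some l => if l ≠ [] then violations ++ [msgBefore l] else violations
      | none => violations
    violations ++ sk

-- ===== PRECONDITION & SPEC =====
def Spec_find_violations_py (htags : List String) (out : List String) : Prop := out = find_violations_py_alt htags
instance (htags : List String) (out : List String) : Decidable (Spec_find_violations_py htags out) := by unfold Spec_find_violations_py; infer_instance

-- ===== CLAIM (what is proved, stated in full; the proofs are below) =====
def Claim_equal_find_violations_py : Prop := ∀ (htags : List String), Dom_find_violations_py htags → Spec_find_violations_py htags (find_violations_py htags)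

-- ===== LEMMAS AND PROOFS =====

-- final prev_level after scanning l starting from prev
def pvFinalPrev (l : List String) (prev : Int) : Int :=
  match l with
  | [] => prev
  | t :: ts => pvFinalPrev ts (PySem.Dict.getD pvLevelMap t 0)

-- the skip messages produced by scanning l starting from prev
def pvSkips (l : List String) (prev : Int) : List String :=
  match l with
  | [] => []
  | t :: ts =>
      let cur := PySem.Dict.getD pvLevelMap t 0
      (if prev > 0 ∧ cur > prev + 1 then [msgSkip t prev] else []) ++ pvSkips ts cur

-- A's final loop computes acc ++ pvSkips and pvFinalPrev
theorem foldA_eq (l : List String) (acc : List String) (prev : Int) :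
    l.foldl
      (fun (st : List String × Int) tag =>
        let current := PySem.Dict.getD pvLevelMap tag 0
        (if st.2 > 0 ∧ current > st.2 + 1 then st.1 ++ [msgSkip tag st.2] else st.1,
         current))
      (acc, prev)
    = (acc ++ pvSkips l prev, pvFinalPrev l prev) := by
  induction l generalizing acc prev with
  | nil => simp [pvSkips, pvFinalPrev]
  | cons t ts ih =>
      simp only [List.foldl_cons, pvSkips, pvFinalPrev]
      split_ifs with h <;> simp [ih, h]

theorem pv_ite_append (P : Prop) [Decidable P] (sk r : List String) (m : String) :
    (if P then sk ++ [m] else sk) ++ r = sk ++ ((if P then [m] else []) ++ r) := by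
  split_ifs <;> simp

-- B's fold in closed form
theorem foldB_eq (htags : List String) (l : List String) (s : Int)
    (c : Int) (b : Option (List String)) (prev : Int) (sk : List String) :
    (PySem.List.enumerate l s).foldl (pvStepB htags) (c, b, prev, sk)
    = (c + (PySem.List.count l "h1" : Int),
       (match b with
        | some x => some x
        | none => (PySem.List.index? l "h1").map
            (fun k => PySem.List.slice htags none (some (s + (k : Int))))),
       pvFinalPrev l prev,
       sk ++ pvSkips l prev) := by
  induction l generalizing s c b prev sk with
  | nil =>
      simp [PySem.List.enumerate_nil, PySem.List.count, pvFinalPrev, pvSkips]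
      cases b <;> simp
  | cons t ts ih =>
      rw [PySem.List.enumerate_cons, List.foldl_cons, ih]
      by_cases ht : t = "h1"
      · subst ht
        cases b with
        | none =>
            simp only [pvStepB, PySem.List.index?_cons_self, pvFinalPrev, pvSkips,
              PySem.List.count]
            simp [pv_ite_append]
            omega
        | some x =>
            simp only [pvStepB, pvFinalPrev, pvSkips, PySem.List.count]
            simp [pv_ite_append]
            omega
      · have hidx := PySem.List.index?_cons_of_ne (xs := ts) (v := "h1") ht
        cases b with
        | none =>
            simp only [pvStepB, pvFinalPrev, pvSkips, PySem.List.count, hidx]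
            simp [ht, pv_ite_append]
            cases hi : List.idxOf? "h1" ts with
            | none => simp [hi]
            | some k =>
                simp [hi]
                have hs : s + 1 + (k : Int) = s + ((k : Int) + 1) := by ring
                rw [hs]
        | some x =>
            simp only [pvStepB, pvFinalPrev, pvSkips, PySem.List.count]
            simp [ht, pv_ite_append]

-- ===== VERDICT (by name: the statement is the Claim_ definition above) =====
theorem find_violations_py_spec : Claim_equal_find_violations_py := by
  intro htags _
  unfold Spec_find_violations_py find_violations_py find_violations_py_alt
  by_cases hnil : htags = []
  · simp [hnil]
  · rw [if_neg hnil, if_neg hnil]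
    dsimp only
    rw [foldA_eq, foldB_eq]
    cases hi : PySem.List.index? htags "h1" with
    | none =>
        have hmem : "h1" ∉ htags := (PySem.List.index?_eq_none_iff _ _).1 hi
        simp [hmem, hi]
    | some k =>
        have hmem : "h1" ∈ htags := by
          have h := PySem.List.index?_isSome_iff (xs := htags) (v := "h1")
          rw [hi] at h
          simpa using h
        simp [hmem, hi]
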